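-- pv_equiv track=rewrite | github.com/Moataz-Alaa/PythonProjects | data structure faculty assignments/test_Lab4_3.py | remove_redundant_minus
-- ===== SOURCE A (Python) =====
-- def remove_redundant_minus(expression):
--     result = []
--     is_minus = False
--
--     for char in expression:
--         if char == '-':
--             is_minus = not is_minus
--         elif is_minus:
--             result.append('-')
--             is_minus = False
--
--         if char != '-':
--             result.append(char)
--
--     return ''.join(result)
-- ===== SOURCE B (Python) =====
-- def remove_redundant_minus(expression):
--     out = []
--     pending = False
--     i = 0
--     n = len(expression)
--     while i < n:
--         if expression[i] == '-':
--             j = i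
--             while j < n and expression[j] == '-':
--                 j += 1
--             pending = (j - i) % 2 == 1
--             i = j
--         else:
--             if pending:
--                 out.append('-')
--                 pending = False
--             j = i
--             while j < n and expression[j] != '-':
--                 j += 1
--             out.append(expression[i:j])
--             i = j
--     return ''.join(out)
-- ===== Notes on version B (the rewrite author's own statement) =====
-- stated objective: alternative
-- what changed: B replaces A's per-character toggle state machine by a run-based scan: it jumps over maximal runs of '-' (recording only the run's parity) and copies maximal minus-free segments as whole slices, emitting at most one '-' per run boundary.
import Mathlib
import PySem

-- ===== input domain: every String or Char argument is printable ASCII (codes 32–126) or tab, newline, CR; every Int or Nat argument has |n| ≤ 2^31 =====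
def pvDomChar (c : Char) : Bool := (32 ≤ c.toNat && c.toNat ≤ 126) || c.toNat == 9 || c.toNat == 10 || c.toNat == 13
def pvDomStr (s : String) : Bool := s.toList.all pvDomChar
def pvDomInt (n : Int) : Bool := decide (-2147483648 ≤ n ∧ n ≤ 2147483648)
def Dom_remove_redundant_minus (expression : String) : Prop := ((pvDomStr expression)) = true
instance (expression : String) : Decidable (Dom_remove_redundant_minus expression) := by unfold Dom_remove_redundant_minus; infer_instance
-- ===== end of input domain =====

-- B replaces A's per-character toggle state machine by a run-based scan over maximal
-- runs of '-' (kept only as a parity bit) and maximal minus-free segments (copied whole);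
-- objective: alternative decomposition, same O(n) cost.

-- ===== PORT A =====
-- one iteration of A's `for char in expression` loop over state (result, is_minus)
def pvStepA (st : List Char × Bool) (char : Char) : List Char × Bool :=
  let st2 :=
    if char = '-' then (st.1, !st.2)
    else if st.2 then (st.1 ++ ['-'], false)
    else st
  if char ≠ '-' then (st2.1 ++ [char], st2.2) else st2

def remove_redundant_minus (expression : String) : String :=
  String.ofList (expression.toList.foldl pvStepA ([], false)).1

-- ===== PORT B =====
-- B's outer while-loop: consume a maximal '-' run (keeping its parity as `pending`)
-- or a maximal minus-free segment (flushing `pending` first, then copying it whole)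
def pvRunsB : List Char → Bool → List Char
  | [], _ => []
  | c :: cs, pending =>
    if c = '-' then
      pvRunsB ((c :: cs).dropWhile (· == '-')) ((((c :: cs).takeWhile (· == '-')).length % 2) == 1)
    else
      (if pending then ['-'] else []) ++ (c :: cs).takeWhile (· != '-')
        ++ pvRunsB ((c :: cs).dropWhile (· != '-')) false
termination_by l => l.length
decreasing_by
  all_goals
  · simp only [List.dropWhile_cons]
    rw [if_pos (by simp [*])]
    exact Nat.lt_succ_of_le (List.length_dropWhile_le _ _)

def remove_redundant_minus_alt (expression : String) : String :=
  String.ofList (pvRunsB expression.toList false)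

-- ===== PRECONDITION & SPEC =====
def Spec_remove_redundant_minus (expression : String) (out : String) : Prop := out = remove_redundant_minus_alt expression
instance (expression : String) (out : String) : Decidable (Spec_remove_redundant_minus expression out) := by unfold Spec_remove_redundant_minus; infer_instance

-- ===== CLAIM (what is proved, stated in full; the proofs are below) =====
def Claim_equal_remove_redundant_minus : Prop := ∀ (expression : String), Dom_remove_redundant_minus expression → Spec_remove_redundant_minus expression (remove_redundant_minus expression)

-- ===== LEMMAS AND PROOFS =====

-- A's loop over a run of '-' only toggles the pending bit, run-parity many times
lemma foldl_minus_run (run : List Char) (h : ∀ c ∈ run, c = '-') (rest : List Char)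
    (acc : List Char) (p : Bool) :
    List.foldl pvStepA (acc, p) (run ++ rest)
      = List.foldl pvStepA (acc, xor p (run.length % 2 == 1)) rest := by
  induction run generalizing p with
  | nil => simp
  | cons c cs ih =>
    have hc : c = '-' := h c (by simp)
    have hcs : ∀ x ∈ cs, x = '-' := fun x hx => h x (by simp [hx])
    have hstep : pvStepA (acc, p) c = (acc, !p) := by
      simp [pvStepA, hc]
    rw [List.cons_append, List.foldl_cons, hstep, ih hcs]
    congr 1
    rcases Nat.even_or_odd cs.length with he | ho
    · have : cs.length % 2 = 0 := Nat.even_iff.mp he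
      have : (c :: cs).length % 2 = 1 := by simp [List.length_cons, Nat.add_mod, this]
      cases p <;> simp_all
    · have : cs.length % 2 = 1 := Nat.odd_iff.mp ho
      have : (c :: cs).length % 2 = 0 := by simp [List.length_cons, Nat.add_mod, this]
      cases p <;> simp_all

-- A's loop over a minus-free segment with no pending '-' just copies it
lemma foldl_seg (seg : List Char) (h : ∀ c ∈ seg, c ≠ '-') (rest : List Char)
    (acc : List Char) :
    List.foldl pvStepA (acc, false) (seg ++ rest)
      = List.foldl pvStepA (acc ++ seg, false) rest := by
  induction seg generalizing acc with
  | nil => simp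
  | cons c cs ih =>
    have hc : c ≠ '-' := h c (by simp)
    have hcs : ∀ x ∈ cs, x ≠ '-' := fun x hx => h x (by simp [hx])
    have hstep : pvStepA (acc, false) c = (acc ++ [c], false) := by
      simp [pvStepA, hc]
    rw [List.cons_append, List.foldl_cons, hstep, ih hcs]
    simp

lemma head?_dropWhile_minus (l : List Char) :
    (l.dropWhile (· == '-')).head? ≠ some '-' := by
  induction l with
  | nil => simp
  | cons c cs ih =>
    by_cases hc : c = '-'
    · simpa [List.dropWhile_cons, hc] using ih
    · simp [hc]

-- main invariant: A's fold from (acc, p) produces acc ++ B's run-scan, provided the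
-- pending bit is false whenever the next character is a '-'
lemma main_inv : ∀ (n : Nat) (l : List Char), l.length ≤ n → ∀ (p : Bool) (acc : List Char),
    (l.head? = some '-' → p = false) →
    (List.foldl pvStepA (acc, p) l).1 = acc ++ pvRunsB l p := by
  intro n
  induction n with
  | zero =>
    intro l hl p acc _
    have : l = [] := List.eq_nil_of_length_eq_zero (Nat.le_zero.mp hl)
    subst this; simp [pvRunsB]
  | succ n ih =>
    intro l hl p acc hp
    cases l with
    | nil => simp [pvRunsB]
    | cons c cs =>
      by_cases hc : c = '-'
      · have hp0 : p = false := hp (by simp [hc])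
        subst hp0
        set run := (c :: cs).takeWhile (· == '-') with hrun
        set rest := (c :: cs).dropWhile (· == '-') with hrest
        have hsplit : run ++ rest = c :: cs := List.takeWhile_append_dropWhile
        have hmem : ∀ x ∈ run, x = '-' := by
          intro x hx
          have := List.mem_takeWhile_imp hx
          simpa using this
        have hrestlen : rest.length ≤ n := by
          have : rest = cs.dropWhile (· == '-') := by
            simp [hrest, hc]
          have h2 : rest.length ≤ cs.length := by
            rw [this]; exact List.length_dropWhile_le _ _
          have h3 : cs.length ≤ n := by simpa using Nat.le_of_succ_le_succ hl
          omega
        have hB : pvRunsB (c :: cs) false = pvRunsB rest ((run.length % 2) == 1) := by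
          rw [pvRunsB, if_pos hc, ← hrun, ← hrest]
        rw [hB, ← hsplit, foldl_minus_run run hmem rest acc false]
        have hxor : xor false ((run.length % 2) == 1) = ((run.length % 2) == 1) := by
          simp
        rw [hxor]
        exact ih rest hrestlen _ acc
          (fun h => absurd h (by simpa [hrest] using head?_dropWhile_minus (c :: cs)))
      · -- non-minus head: one A-step flushes pending and emits c, then copy the rest
        -- of the segment and recurse on the remainder with pending := false
        set seg := cs.takeWhile (· != '-') with hseg
        set rest := cs.dropWhile (· != '-') with hrest
        have hsplit : seg ++ rest = cs := List.takeWhile_append_dropWhile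
        have hmem : ∀ x ∈ seg, x ≠ '-' := by
          intro x hx
          have := List.mem_takeWhile_imp hx
          simpa using this
        have hstep : pvStepA (acc, p) c
            = ((if p then acc ++ ['-'] else acc) ++ [c], false) := by
          cases p <;> simp [pvStepA, hc]
        have hrestlen : rest.length ≤ n := by
          have h2 : rest.length ≤ cs.length := by
            rw [hrest]; exact List.length_dropWhile_le _ _
          have h3 : cs.length ≤ n := by simpa using Nat.le_of_succ_le_succ hl
          omega
        have htw : (c :: cs).takeWhile (· != '-') = c :: seg := by
          rw [List.takeWhile_cons, if_pos (by simp [hc]), ← hseg]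
        have hdw : (c :: cs).dropWhile (· != '-') = rest := by
          rw [List.dropWhile_cons, if_pos (by simp [hc]), ← hrest]
        have hB : pvRunsB (c :: cs) p
            = (if p then ['-'] else []) ++ (c :: seg) ++ pvRunsB rest false := by
          rw [pvRunsB, if_neg hc, htw, hdw]
        rw [List.foldl_cons, hstep, hB, ← hsplit, foldl_seg seg hmem rest _,
          ih rest hrestlen false _ (fun _ => rfl)]
        cases p <;> simp
theorem main_inv_apply (l : List Char) :
    (List.foldl pvStepA ([], false) l).1 = pvRunsB l false := by
  simpa using main_inv l.length l le_rfl false [] (fun _ => rfl)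

-- ===== VERDICT (by name: the statement is the Claim_ definition above) =====
theorem remove_redundant_minus_spec : Claim_equal_remove_redundant_minus := by
  intro expression _
  unfold Spec_remove_redundant_minus remove_redundant_minus remove_redundant_minus_alt
  rw [main_inv_apply]
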